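-- pv_equiv track=rewrite | github.com/ycr5007/SolDesk | PythonSource/algorithm/6_samename.py | dup_name2
-- ===== SOURCE A (Python) =====
-- def dup_name2(list):
--     result = {}
--     for name in list:
--         if result.get(name) == None:
--             result[name] = 0
--         else:
--             result[name] += 1
--     return result
-- ===== SOURCE B (Python) =====
-- def dup_name2(list):
--     return {name: list.count(name) - 1 for name in dict.fromkeys(list)}
-- ===== Notes on version B (the rewrite author's own statement) =====
-- stated objective: idiomatic
-- what changed: B drops A's single hash-tallying pass with a first-seen/else branch entirely: it deduplicates the names in first-appearance order (dict.fromkeys) and then, per distinct name, counts its occurrences with list.count, mapping each to count-1.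
import Mathlib
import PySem

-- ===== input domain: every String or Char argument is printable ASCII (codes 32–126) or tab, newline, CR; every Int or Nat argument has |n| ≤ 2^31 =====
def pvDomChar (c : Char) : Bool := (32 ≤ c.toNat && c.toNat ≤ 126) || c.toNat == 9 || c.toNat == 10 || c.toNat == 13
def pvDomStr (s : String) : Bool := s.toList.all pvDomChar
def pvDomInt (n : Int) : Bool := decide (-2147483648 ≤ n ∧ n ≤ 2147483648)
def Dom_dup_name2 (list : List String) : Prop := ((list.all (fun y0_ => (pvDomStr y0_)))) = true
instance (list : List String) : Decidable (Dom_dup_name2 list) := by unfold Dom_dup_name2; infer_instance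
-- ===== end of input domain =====

-- B re-implements A as dedup-then-count: distinct names in first-appearance order, each mapped to list.count(name) - 1; return values proved equal.

-- ===== PORT A =====
-- A: one pass over the list; first sighting stores 0, later sightings increment.
def dup_name2 (list : List String) : List (String × Int) :=
  (list.foldl (fun (result : PySem.Dict String Int) name =>
      match result.get? name with
      | none => result.insert name 0
      | some v => result.insert name (v + 1)) PySem.Dict.empty).items

-- ===== PORT B =====
-- B: dedupe in first-appearance order, then count each distinct name over the whole list.
def dup_name2_alt (list : List String) : List (String × Int) :=
  (PySem.List.dedup list).map (fun name => (name, (PySem.List.count list name : Int) - 1))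

-- ===== PRECONDITION & SPEC =====
def Spec_dup_name2 (list : List String) (out : List (String × Int)) : Prop := out = dup_name2_alt list
instance (list : List String) (out : List (String × Int)) : Decidable (Spec_dup_name2 list out) := by unfold Spec_dup_name2; infer_instance

-- ===== CLAIM (what is proved, stated in full; the proofs are below) =====
def Claim_equal_dup_name2 : Prop := ∀ (list : List String), Dom_dup_name2 list → Spec_dup_name2 list (dup_name2 list)

-- ===== LEMMAS AND PROOFS =====

-- A's loop body always inserts getD name (-1) + 1.
lemma stepA_eq :
    (fun (d : PySem.Dict String Int) name =>
      match d.get? name with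
      | none => d.insert name 0
      | some v => d.insert name (v + 1))
    = (fun (d : PySem.Dict String Int) name => d.insert name (d.getD name (-1) + 1)) := by
  funext d name
  cases h : d.get? name <;>
    simp [PySem.Dict.getD_eq_get?_getD, h]

-- A's running dict maps v to (starting value) + (occurrences seen so far).
lemma getD_foldA (l : List String) (d : PySem.Dict String Int) (v : String) :
    (l.foldl (fun (d : PySem.Dict String Int) x => d.insert x (d.getD x (-1) + 1)) d).getD v (-1)
      = d.getD v (-1) + l.count v := by
  induction l generalizing d with
  | nil => simp
  | cons x xs ih =>
    rw [List.foldl_cons, ih (d.insert x (d.getD x (-1) + 1)), PySem.Dict.getD_insert,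
        List.count_cons]
    by_cases hv : v = x
    · simp [hv]; ring
    · simp [hv]; exact Ne.symm hv

-- ===== VERDICT =====
theorem dup_name2_spec : Claim_equal_dup_name2 := by
  intro list _
  unfold Spec_dup_name2 dup_name2 dup_name2_alt
  rw [stepA_eq]
  have hnd : (list.foldl (fun (d : PySem.Dict String Int) x =>
      d.insert x (d.getD x (-1) + 1)) PySem.Dict.empty).keys.Nodup :=
    PySem.Dict.nodup_keys_foldl_insert _ _ _ (by simp)
  rw [PySem.Dict.items_eq_map_keys _ hnd (-1), PySem.Dict.keys_foldl_insert]
  simp only [PySem.Dict.keys_empty, PySem.Set.update_nil_left, PySem.List.dedup_eq_ofList]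
  refine List.map_congr_left fun k _ => ?_
  rw [getD_foldA]
  simp [PySem.List.count]
  omega
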